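-- pv_equiv track=rewrite | github.com/mroncarelli/xraysim | xraysim/specutils/specfit.py | notice_list_split
-- ===== SOURCE A (Python) =====
-- def notice_list_split(notice) -> list:
--     """
--     Splits a list with notice channels into intervals to be used with the notice command.
--     :param notice: (list of int) Notice channels, in increasing order
--     :return: (list of tuples) List containg tuples with the starting and endpoint of the intervals
--     """
--     result = []
--     if notice is not None:
--         index = 0
--         start = notice[index]
--         if len(notice) == 1:
--             result.append((notice[0], notice[0]))
--         else:
--             while index < len(notice) - 1:
--                 index += 1
--                 while notice[index] == notice[index - 1] + 1 and index < len(notice) - 1: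
--                     index += 1
--                 if index != len(notice) - 1:
--                     result.append((start, notice[index - 1]))
--                     start = notice[index]
--                 else:
--                     if notice[index] == notice[index - 1] + 1:
--                         result.append((start, notice[index]))
--                     else:
--                         result.append((start, notice[index - 1]))
--                         result.append((notice[index], notice[index]))
--
--     return result
-- ===== SOURCE B (Python) =====
-- def notice_list_split(notice) -> list:
--     result = []
--     if notice is not None:
--         start = prev = notice[0]
--         for x in notice[1:]:
--             if x == prev + 1:
--                 prev = x
--             else:
--                 result.append((start, prev))
--                 start = prev = x
--         result.append((start, prev))
--     return result
-- ===== Notes on version B (the rewrite author's own statement) =====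
-- stated objective: simpler
-- what changed: Replaces A's nested index-driven while-loops with endpoint special cases by one flat accumulator pass over the tail that keeps (start, prev) and flushes a run when the next element is not prev+1.
import Mathlib
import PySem

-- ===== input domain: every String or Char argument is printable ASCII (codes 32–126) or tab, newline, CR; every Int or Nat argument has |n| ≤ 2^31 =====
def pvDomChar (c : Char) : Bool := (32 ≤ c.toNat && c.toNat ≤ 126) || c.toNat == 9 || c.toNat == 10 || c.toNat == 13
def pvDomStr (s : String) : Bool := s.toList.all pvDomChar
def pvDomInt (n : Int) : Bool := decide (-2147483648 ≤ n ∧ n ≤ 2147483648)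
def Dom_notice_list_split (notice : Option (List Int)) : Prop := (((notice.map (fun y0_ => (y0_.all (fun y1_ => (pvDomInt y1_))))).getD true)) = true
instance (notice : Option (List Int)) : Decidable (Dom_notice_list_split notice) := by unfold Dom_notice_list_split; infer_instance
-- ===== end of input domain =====

-- B replaces A's nested index-driven while-loops and endpoint special cases with one
-- flat (start, prev) accumulator pass over the tail; objective: simpler.

-- ===== PORT A =====
-- Inner while loop: advance index while notice[index] == notice[index-1] + 1 and index < len-1.
-- In-range nonnegative indexing only (guaranteed by the loop bounds), so getD is exact here.
def nlsInner (xs : List Int) (index : Nat) : Nat :=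
  if xs.getD index 0 = xs.getD (index - 1) 0 + 1 ∧ index < xs.length - 1 then
    nlsInner xs (index + 1)
  else index
termination_by xs.length - index
decreasing_by omega


theorem nlsInner_ge (xs : List Int) (i : Nat) : i ≤ nlsInner xs i := by
  unfold nlsInner
  split
  · exact Nat.le_trans (Nat.le_succ _) (nlsInner_ge xs (i + 1))
  · exact Nat.le_refl _
termination_by xs.length - i
decreasing_by omega

-- Outer while loop of A (the `else` branch exits the loop since index = len-1 there).
def nlsOuter (xs : List Int) (index : Nat) (start : Int) (result : List (Int × Int)) :
    List (Int × Int) :=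
  if _h : index < xs.length - 1 then
    let i2 := nlsInner xs (index + 1)
    if i2 ≠ xs.length - 1 then
      nlsOuter xs i2 (xs.getD i2 0) (result ++ [(start, xs.getD (i2 - 1) 0)])
    else
      if xs.getD i2 0 = xs.getD (i2 - 1) 0 + 1 then
        result ++ [(start, xs.getD i2 0)]
      else
        result ++ [(start, xs.getD (i2 - 1) 0), (xs.getD i2 0, xs.getD i2 0)]
  else result
termination_by xs.length - index
decreasing_by
  have := nlsInner_ge xs (index + 1)
  omega

-- On the empty list Python raises IndexError at `notice[0]` (excluded by Pre_).
def notice_list_split (notice : Option (List Int)) : List (Int × Int) :=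
  match notice with
  | none => []
  | some xs =>
    if xs.length = 0 then []
    else if xs.length = 1 then [(xs.getD 0 0, xs.getD 0 0)]
    else nlsOuter xs 0 (xs.getD 0 0) []

-- ===== PORT B =====
-- Flat pass over notice[1:] with state (start, prev, result).
def nlsLoop (xs : List Int) (start prev : Int) (result : List (Int × Int)) :
    List (Int × Int) :=
  match xs with
  | [] => result ++ [(start, prev)]
  | x :: rest =>
    if x = prev + 1 then nlsLoop rest start x result
    else nlsLoop rest x x (result ++ [(start, prev)])

-- On the empty list Python B raises IndexError at `notice[0]` (excluded by Pre_).
def notice_list_split_alt (notice : Option (List Int)) : List (Int × Int) :=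
  match notice with
  | none => []
  | some [] => []
  | some (x :: rest) => nlsLoop rest x x []

-- ===== PRECONDITION & SPEC =====
-- Pre_ excludes only `some []`, on which Python A (and B) raises IndexError at notice[0].
def Pre_notice_list_split (notice : Option (List Int)) : Prop := notice ≠ some []
instance (notice : Option (List Int)) : Decidable (Pre_notice_list_split notice) := by
  unfold Pre_notice_list_split; infer_instance

def pvWitness_notice_list_split : Option (List Int) := some [1, 2, 5]

def Spec_notice_list_split (notice : Option (List Int)) (out : List (Int × Int)) : Prop :=
  out = notice_list_split_alt notice
instance (notice : Option (List Int)) (out : List (Int × Int)) :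
    Decidable (Spec_notice_list_split notice out) := by
  unfold Spec_notice_list_split; infer_instance

-- ===== CLAIM =====
def Claim_equal_notice_list_split : Prop :=
  ∀ (notice : Option (List Int)), Dom_notice_list_split notice →
    Pre_notice_list_split notice →
    Spec_notice_list_split notice (notice_list_split notice)

-- ===== LEMMAS AND PROOFS =====
theorem nlsInner_le (xs : List Int) (i : Nat) (h : i ≤ xs.length - 1) :
    nlsInner xs i ≤ xs.length - 1 := by
  rw [nlsInner]
  split
  · next hc => exact nlsInner_le xs (i + 1) (by omega)
  · exact h
termination_by xs.length - i
decreasing_by omega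

theorem nlsInner_stop (xs : List Int) (i : Nat) :
    ¬ (xs.getD (nlsInner xs i) 0 = xs.getD (nlsInner xs i - 1) 0 + 1 ∧
       nlsInner xs i < xs.length - 1) := by
  rw [nlsInner]
  split
  · exact nlsInner_stop xs (i + 1)
  · assumption
termination_by xs.length - i
decreasing_by omega

theorem drop_cons_getD (xs : List Int) (i : Nat) (h : i < xs.length) :
    xs.drop i = xs.getD i 0 :: xs.drop (i + 1) := by
  rw [List.drop_eq_getElem_cons h, List.getD_eq_getElem _ _ h]

-- During the inner advance every consumed element is consecutive, so B only updates prev.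
theorem step (xs : List Int) (i : Nat) (s : Int) (r : List (Int × Int))
    (h1 : 1 ≤ i) (hlen : 2 ≤ xs.length) :
    nlsLoop (xs.drop i) s (xs.getD (i - 1) 0) r =
    nlsLoop (xs.drop (nlsInner xs i)) s (xs.getD (nlsInner xs i - 1) 0) r := by
  by_cases hc : xs.getD i 0 = xs.getD (i - 1) 0 + 1 ∧ i < xs.length - 1
  · rw [show nlsInner xs i = nlsInner xs (i + 1) from by rw [nlsInner]; simp only [if_pos hc]]
    rw [← step xs (i + 1) s r (by omega) hlen]
    rw [drop_cons_getD xs i (by omega), nlsLoop, if_pos hc.1]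
    simp
  · rw [show nlsInner xs i = i from by rw [nlsInner]; simp only [if_neg hc]]
termination_by xs.length - i
decreasing_by omega

theorem main (xs : List Int) (j : Nat) (s : Int) (r : List (Int × Int))
    (hj : j < xs.length - 1) :
    nlsOuter xs j s r = nlsLoop (xs.drop (j + 1)) s (xs.getD j 0) r := by
  have hge := nlsInner_ge xs (j + 1)
  have hle := nlsInner_le xs (j + 1) (by omega)
  have hstop := nlsInner_stop xs (j + 1)
  have hstep := step xs (j + 1) s r (by omega) (by omega)
  simp only [Nat.add_sub_cancel] at hstep
  rw [nlsOuter, dif_pos hj, hstep]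
  by_cases hi2 : nlsInner xs (j + 1) = xs.length - 1
  · have hdrop : xs.drop (nlsInner xs (j + 1) + 1) = [] := List.drop_eq_nil_iff.2 (by omega)
    rw [drop_cons_getD xs (nlsInner xs (j + 1)) (by omega), hdrop]
    simp [nlsLoop, hi2]
  · have hlt : nlsInner xs (j + 1) < xs.length - 1 := by omega
    have hne : xs.getD (nlsInner xs (j + 1)) 0 ≠ xs.getD (nlsInner xs (j + 1) - 1) 0 + 1 := by
      intro h; exact hstop ⟨h, hlt⟩
    rw [drop_cons_getD xs (nlsInner xs (j + 1)) (by omega), nlsLoop, if_neg hne]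
    simp only [if_pos hi2]
    exact main xs (nlsInner xs (j + 1)) (xs.getD (nlsInner xs (j + 1)) 0)
      (r ++ [(s, xs.getD (nlsInner xs (j + 1) - 1) 0)]) hlt
termination_by xs.length - j
decreasing_by omega

-- ===== VERDICT =====
theorem notice_list_split_spec : Claim_equal_notice_list_split := by
  intro notice _ hpre
  unfold Spec_notice_list_split
  match notice with
  | none => rfl
  | some [] => exact absurd rfl hpre
  | some [x] => rfl
  | some (x :: y :: rest) =>
    show nlsOuter (x :: y :: rest) 0 ((x :: y :: rest).getD 0 0) [] = _
    rw [main (x :: y :: rest) 0 ((x :: y :: rest).getD 0 0) [] (by simp)]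
    rfl
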